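-- pv_equiv track=rewrite | github.com/Matheus-Garbelini/docker-agent | examples/compaction_script.py | dedupe_recent_reasoning
-- ===== SOURCE A (Python) =====
-- from typing import Any, Dict, List, Set
--
-- def dedupe_recent_reasoning(reasoning: List[str]) -> List[str]:
--     seen = set()  # type: Set[str]
--     unique = []  # type: List[str]
--     for item in reversed(reasoning):
--         key = item[:50].lower()
--         if key in seen:
--             continue
--         seen.add(key)
--         unique.append(item)
--     return list(reversed(unique[:10]))
-- ===== SOURCE B (Python) =====
-- from typing import Dict, List
--
-- def dedupe_recent_reasoning(reasoning: List[str]) -> List[str]: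
--     d = {}  # type: Dict[str, str]
--     for item in reasoning:
--         key = item[:50].lower()
--         if key in d:
--             del d[key]
--         d[key] = item
--     return list(d.values())[-10:]
-- ===== Notes on version B (the rewrite author's own statement) =====
-- stated objective: alternative
-- what changed: Replaced the reverse-iteration with a seen-set, append, truncate and double reversal by a single forward pass over an order-maintaining dict with move-to-end (delete before reinsert), returning the last 10 values.
import Mathlib
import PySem

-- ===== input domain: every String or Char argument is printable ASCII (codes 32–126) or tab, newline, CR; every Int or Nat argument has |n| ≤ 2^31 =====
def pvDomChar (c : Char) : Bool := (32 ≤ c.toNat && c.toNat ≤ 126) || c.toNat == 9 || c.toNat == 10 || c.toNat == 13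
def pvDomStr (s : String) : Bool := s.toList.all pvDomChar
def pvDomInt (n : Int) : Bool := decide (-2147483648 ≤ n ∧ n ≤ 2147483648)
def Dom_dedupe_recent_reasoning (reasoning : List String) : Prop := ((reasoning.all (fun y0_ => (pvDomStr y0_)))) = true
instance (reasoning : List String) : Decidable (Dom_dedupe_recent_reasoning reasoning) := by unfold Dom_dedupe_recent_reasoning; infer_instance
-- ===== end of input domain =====

-- B replaces A's reverse pass with a seen-set, truncation and double reversal by one forward pass
-- over a move-to-end dict (delete before reinsert) followed by [-10:]; objective: alternative decomposition.

-- key = item[:50].lower()  (the key expression both Pythons share)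
def pvKey (item : String) : String := PySem.Str.lower (PySem.Str.slice item none (some 50))

-- ===== PORT A =====
-- A's loop body: skip a seen key, else record the key and append the item
def stepA (acc : PySem.Set String × List String) (item : String) : PySem.Set String × List String :=
  let key := pvKey item
  if PySem.Set.contains acc.1 key then acc
  else (PySem.Set.add acc.1 key, acc.2 ++ [item])

def dedupe_recent_reasoning (reasoning : List String) : List String :=
  let res := reasoning.reverse.foldl stepA (PySem.Set.empty, [])
  (PySem.List.slice res.2 none (some 10)).reverse

-- ===== PORT B =====
-- B's loop body: if the key is present delete it, then assign d[key] = item (move to end)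
def stepB (d : PySem.Dict String String) (item : String) : PySem.Dict String String :=
  let key := pvKey item
  let d := if d.contains key then d.erase key else d
  d.insert key item

def dedupe_recent_reasoning_alt (reasoning : List String) : List String :=
  let d := reasoning.foldl stepB PySem.Dict.empty
  PySem.List.slice d.values (some (-10)) none

-- ===== PRECONDITION & SPEC =====
def Spec_dedupe_recent_reasoning (reasoning : List String) (out : List String) : Prop := out = dedupe_recent_reasoning_alt reasoning
instance (reasoning : List String) (out : List String) : Decidable (Spec_dedupe_recent_reasoning reasoning out) := by unfold Spec_dedupe_recent_reasoning; infer_instance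

-- ===== CLAIM (what is proved, stated in full; the proofs are below) =====
def Claim_equal_dedupe_recent_reasoning : Prop := ∀ (reasoning : List String), Dom_dedupe_recent_reasoning reasoning → Spec_dedupe_recent_reasoning reasoning (dedupe_recent_reasoning reasoning)

-- ===== LEMMAS AND PROOFS =====

-- the elements of l whose key does not recur later in l, in order (= the last occurrence of every key)
def lastOcc : List String → List String
  | [] => []
  | x :: xs => if (xs.map pvKey).contains (pvKey x) then lastOcc xs else x :: lastOcc xs

theorem lastOcc_append (l : List String) (x : String) :
    lastOcc (l ++ [x]) = (lastOcc l).filter (fun s => !(pvKey s == pvKey x)) ++ [x] := by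
  induction l with
  | nil => simp [lastOcc]
  | cons y ys ih =>
    by_cases h1 : ∃ a ∈ ys, pvKey a = pvKey y
    · simp [lastOcc, h1, ih]
    · by_cases h2 : pvKey y = pvKey x
      · have h1' : ¬ ∃ a ∈ ys, pvKey a = pvKey x := by simpa [h2] using h1
        simp [lastOcc, h1', h2, ih]
      · simp [lastOcc, h1, h2, ih]

-- one B step filters the key out of the items and appends the new pair
theorem stepB_items (d : PySem.Dict String String) (item : String) :
    (stepB d item).items =
      d.items.filter (fun p => !(p.1 == pvKey item)) ++ [(pvKey item, item)] := by
  unfold stepB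
  by_cases h : d.contains (pvKey item)
  · simp [h, PySem.Dict.insert, PySem.Dict.erase]
  · have h' : ∀ x : String, (pvKey item, x) ∉ d.items := by
      simpa [PySem.Dict.contains, List.any_eq_true] using h
    have hfe : d.items.filter (fun p => !(p.1 == pvKey item)) = d.items := by
      apply List.filter_eq_self.mpr
      rintro ⟨a, b⟩ hp
      simp only [Bool.not_eq_true', beq_eq_false_iff_ne, ne_eq]
      rintro rfl
      exact h' b hp
    simp [h, PySem.Dict.insert, hfe]

-- B's dict after the whole pass: exactly the last occurrences, keyed
theorem foldB_items (l : List String) :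
    (l.foldl stepB PySem.Dict.empty).items = (lastOcc l).map (fun s => (pvKey s, s)) := by
  induction l using List.reverseRecOn with
  | nil => simp [PySem.Dict.empty, lastOcc]
  | append_singleton l x ih =>
    rw [List.foldl_append, List.foldl_cons, List.foldl_nil, stepB_items, ih, lastOcc_append,
      List.map_append, List.filter_map]
    simp only [Function.comp_def, List.map_cons, List.map_nil]

-- skeleton of A's pass: the elements whose key is new w.r.t. the growing seen set
def firstOccS : List String → PySem.Set String → List String
  | [], _ => []
  | x :: xs, s =>
      if PySem.Set.contains s (pvKey x) then firstOccS xs s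
      else x :: firstOccS xs (PySem.Set.add s (pvKey x))

theorem foldA_snd (m : List String) (s : PySem.Set String) (u : List String) :
    (m.foldl stepA (s, u)).2 = u ++ firstOccS m s := by
  induction m generalizing s u with
  | nil => simp [firstOccS]
  | cons x xs ih =>
    by_cases h : pvKey x ∈ s
    · simp [stepA, firstOccS, h, ih]
    · simp [stepA, firstOccS, h, ih]

theorem firstOccS_snoc (m : List String) (x : String) (s : PySem.Set String) :
    firstOccS (m ++ [x]) s =
      firstOccS m s ++
        (if pvKey x ∈ s ∨ pvKey x ∈ m.map pvKey then [] else [x]) := by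
  induction m generalizing s with
  | nil => by_cases h : pvKey x ∈ s <;> simp [firstOccS, h]
  | cons y m ih =>
    by_cases h : pvKey y ∈ s
    · by_cases hxy : pvKey x = pvKey y
      · simp [firstOccS, h, ih, hxy, List.mem_cons]
      · simp [firstOccS, h, ih, hxy]
    · simp [firstOccS, h, ih, List.mem_cons]
      by_cases hxy : pvKey x = pvKey y <;> simp [hxy]

-- A's backward pass is the reverse of the last-occurrence filter
theorem firstOccS_reverse (l : List String) (s : PySem.Set String) :
    firstOccS l.reverse s =
      ((lastOcc l).filter (fun y => !(PySem.Set.contains s (pvKey y)))).reverse := by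
  induction l with
  | nil => simp [firstOccS, lastOcc]
  | cons x xs ih =>
    rw [List.reverse_cons, firstOccS_snoc, ih]
    by_cases h1 : ∃ a ∈ xs, pvKey a = pvKey x
    · simp [lastOcc, h1]
    · by_cases h2 : pvKey x ∈ s
      · simp [lastOcc, h1, h2]
      · simp [lastOcc, h1, h2]

-- ===== VERDICT (by name: the statement is the Claim_ definition above) =====
theorem dedupe_recent_reasoning_spec : Claim_equal_dedupe_recent_reasoning := by
  intro reasoning _
  unfold Spec_dedupe_recent_reasoning dedupe_recent_reasoning dedupe_recent_reasoning_alt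
  show (PySem.List.slice ((reasoning.reverse.foldl stepA (PySem.Set.empty, [])).2) none (some 10)).reverse
      = PySem.List.slice (reasoning.foldl stepB PySem.Dict.empty).values (some (-10)) none
  rw [foldA_snd, firstOccS_reverse]
  have hvals : (reasoning.foldl stepB PySem.Dict.empty).values = lastOcc reasoning := by
    simp [PySem.Dict.values, foldB_items, List.map_map, Function.comp_def]
  rw [hvals]
  have hfilter : (lastOcc reasoning).filter
      (fun y => !(PySem.Set.contains PySem.Set.empty (pvKey y))) = lastOcc reasoning := by
    simp [PySem.Set.empty]
  rw [hfilter]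
  rw [PySem.List.slice_to _ (by norm_num), PySem.List.slice_from_neg_ofNat _ 10 (by norm_num)]
  rw [List.nil_append, List.take_reverse, List.reverse_reverse]
  rfl
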